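-- pv_equiv track=rewrite | github.com/nastyh/LeetCode | Basic Data Structures/sum_of_digits_is_palindrome.py | sum_of_digits_is_palindrome
-- ===== SOURCE A (Python) =====
-- def sum_of_digits_is_palindrome(num):
--     """
--     O(log10n) to convert
--     Same to store
--     """
--     if num < 10: return True
--     new_val = 0
--     for ch in str(num):
--         new_val += int(ch)
--     new_val_ch = str(new_val)
--     def _helper(s):
--         l, r = 0, len(s) - 1
--         while l <= r:
--             if s[l] != s[r]:
--                 return False
--             l += 1
--             r -= 1
--         return True
--     return _helper(new_val_ch)
-- ===== SOURCE B (Python) =====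
-- def sum_of_digits_is_palindrome(num):
--     if num < 10: return True
--     s = 0
--     t = num
--     while t > 0:
--         s += t % 10
--         t //= 10
--     rev = 0
--     u = s
--     while u > 0:
--         rev = rev * 10 + u % 10
--         u //= 10
--     return rev == s
-- ===== Notes on version B (the rewrite author's own statement) =====
-- stated objective: alternative
-- what changed: Digit sum is computed with modular arithmetic (t % 10, t //= 10) instead of iterating over str(num), and the palindrome test reverses the sum numerically (rev = rev*10 + u%10) and compares rev == s instead of converting to a string and scanning with two pointers.
import Mathlib
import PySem

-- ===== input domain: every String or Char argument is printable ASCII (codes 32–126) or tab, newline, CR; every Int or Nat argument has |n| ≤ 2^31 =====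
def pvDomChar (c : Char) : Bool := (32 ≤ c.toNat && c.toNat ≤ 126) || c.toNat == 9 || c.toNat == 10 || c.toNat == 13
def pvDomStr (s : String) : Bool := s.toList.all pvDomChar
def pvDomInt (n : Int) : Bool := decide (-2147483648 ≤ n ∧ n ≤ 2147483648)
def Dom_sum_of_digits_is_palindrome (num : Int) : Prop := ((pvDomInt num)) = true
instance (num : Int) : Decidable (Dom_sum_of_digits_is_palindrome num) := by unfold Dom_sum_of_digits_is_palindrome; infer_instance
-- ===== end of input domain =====

-- B replaces A's string-based digit sum and two-pointer string palindrome scan with pure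
-- integer arithmetic: a %/÷10 digit-sum loop and a numeric reversal compared with ==.
-- (Loops are ported with an explicit fuel that provably exceeds the iteration count.)

-- ===== PORT A =====
-- the inner `_helper` two-pointer while-loop; fuel > window size, so it never runs out
def pvHelperA (s : List Char) : Nat → Int → Int → Bool
  | 0, _, _ => true
  | f + 1, l, r =>
    if l ≤ r then
      match PySem.List.pyGet? s l, PySem.List.pyGet? s r with
      | some a, some b => if a ≠ b then false else pvHelperA s f (l + 1) (r - 1)
      | _, _ => false   -- unreachable: 0 ≤ l ≤ r ≤ len - 1 throughout
    else true

def sum_of_digits_is_palindrome (num : Int) : Bool :=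
  if num < 10 then true
  else
    -- for ch in str(num): new_val += int(ch)   (str via toChars, cf. PySem.Int.toList_toStr;
    -- int(ch) = ofChars? [ch], always `some` here since every ch is a digit)
    let new_val : Int :=
      (PySem.Int.toChars num).foldl (fun a c => a + (PySem.Int.ofChars? [c]).getD 0) 0
    let new_val_ch := PySem.Int.toChars new_val
    pvHelperA new_val_ch (new_val_ch.length + 1) 0 ((new_val_ch.length : Int) - 1)

-- ===== PORT B =====
-- while t > 0: s += t % 10; t //= 10     (fuel t.toNat bounds the iteration count)
def pvDSum : Nat → Int → Int → Int
  | 0, _, s => s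
  | f + 1, t, s =>
    if 0 < t then pvDSum f (PySem.Int.floordiv t 10) (s + PySem.Int.mod t 10) else s

-- while u > 0: rev = rev * 10 + u % 10; u //= 10
def pvRev : Nat → Int → Int → Int
  | 0, _, rev => rev
  | f + 1, u, rev =>
    if 0 < u then pvRev f (PySem.Int.floordiv u 10) (rev * 10 + PySem.Int.mod u 10) else rev

def sum_of_digits_is_palindrome_alt (num : Int) : Bool :=
  if num < 10 then true
  else
    let s := pvDSum num.toNat num 0
    let rev := pvRev s.toNat s 0
    rev == s

-- ===== PRECONDITION & SPEC =====
def Spec_sum_of_digits_is_palindrome (num : Int) (out : Bool) : Prop := out = sum_of_digits_is_palindrome_alt num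
instance (num : Int) (out : Bool) : Decidable (Spec_sum_of_digits_is_palindrome num out) := by unfold Spec_sum_of_digits_is_palindrome; infer_instance

-- ===== CLAIM (what is proved, stated in full; the proofs are below) =====
def Claim_equal_sum_of_digits_is_palindrome : Prop := ∀ (num : Int), Dom_sum_of_digits_is_palindrome num → Spec_sum_of_digits_is_palindrome num (sum_of_digits_is_palindrome num)

-- ===== LEMMAS AND PROOFS =====

-- mathematical digit list / digit sum used to relate the two ports
def pvDigs (n : Nat) : List Char :=
  if _h : n < 10 then [Nat.digitChar n] else pvDigs (n / 10) ++ [Nat.digitChar (n % 10)]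
termination_by n
decreasing_by omega

def pvDsN (n : Nat) : Nat :=
  if _h : n < 10 then n else pvDsN (n / 10) + n % 10
termination_by n
decreasing_by omega


lemma pvDigs_lt {n : Nat} (h : n < 10) : pvDigs n = [Nat.digitChar n] := by
  rw [pvDigs]; exact dif_pos h

lemma pvDigs_ge {n : Nat} (h : ¬ n < 10) :
    pvDigs n = pvDigs (n / 10) ++ [Nat.digitChar (n % 10)] := by
  rw [pvDigs]; exact dif_neg h

lemma pvDsN_lt {n : Nat} (h : n < 10) : pvDsN n = n := by
  rw [pvDsN]; exact dif_pos h

lemma pvDsN_ge {n : Nat} (h : ¬ n < 10) : pvDsN n = pvDsN (n / 10) + n % 10 := by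
  rw [pvDsN]; exact dif_neg h

lemma toDigitsCore_eq_pvDigs : ∀ (f n : Nat) (ds : List Char), n < f →
    Nat.toDigitsCore 10 f n ds = pvDigs n ++ ds := by
  intro f
  induction f with
  | zero => omega
  | succ f ih =>
    intro n ds hn
    rw [Nat.toDigitsCore]
    by_cases h10 : n / 10 = 0
    · have : n < 10 := by omega
      rw [if_pos h10, pvDigs_lt this, Nat.mod_eq_of_lt this]
      rfl
    · have hlt : ¬ n < 10 := by omega
      rw [if_neg h10, ih (n / 10) _ (by omega), pvDigs_ge hlt]
      simp

lemma toChars_eq_pvDigs (n : Int) (hn : 0 ≤ n) :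
    PySem.Int.toChars n = pvDigs n.toNat := by
  rw [PySem.Int.toChars, if_neg (by omega), Nat.toDigits,
      toDigitsCore_eq_pvDigs _ _ _ (by omega), List.append_nil]

lemma digitChar_val (d : Nat) (hd : d < 10) :
    (PySem.Int.ofChars? [Nat.digitChar d]).getD 0 = (d : Int) := by
  interval_cases d <;> decide

lemma foldA_eq_pvDsN : ∀ (n : Nat) (acc : Int),
    (pvDigs n).foldl (fun a c => a + (PySem.Int.ofChars? [c]).getD 0) acc = acc + (pvDsN n : Int) := by
  intro n
  induction n using Nat.strong_induction_on with
  | _ n ih =>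
    intro acc
    by_cases h10 : n < 10
    · rw [pvDigs_lt h10, pvDsN_lt h10]
      simp [digitChar_val n h10]
    · rw [pvDigs_ge h10, pvDsN_ge h10, List.foldl_append,
          ih (n / 10) (by omega)]
      simp [digitChar_val (n % 10) (by omega)]
      ring

lemma pvDSum_eq : ∀ (f m : Nat) (s : Int), m ≤ f → pvDSum f (m : Int) s = s + (pvDsN m : Int) := by
  intro f
  induction f with
  | zero =>
    intro m s hm
    have : m = 0 := by omega
    subst this
    rw [pvDSum, pvDsN]
    simp
  | succ f ih =>
    intro m s hm
    by_cases h0 : 0 < m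
    · rw [pvDSum, if_pos (by exact_mod_cast h0)]
      have hfd : PySem.Int.floordiv (m : Int) 10 = ((m / 10 : Nat) : Int) :=
        PySem.Int.floordiv_natCast m 10
      have hmd : PySem.Int.mod (m : Int) 10 = ((m % 10 : Nat) : Int) :=
        PySem.Int.mod_natCast m 10
      rw [hfd, hmd, ih (m / 10) _ (by omega)]
      by_cases h10 : m < 10
      · have h0' : m / 10 = 0 := by omega
        rw [pvDsN_lt h10, h0', pvDsN_lt (by omega : (0:Nat) < 10)]
        push_cast
        omega
      · rw [pvDsN_ge h10]
        push_cast
        ring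
    · have : m = 0 := by omega
      subst this
      rw [pvDSum, if_neg (by norm_num), pvDsN_lt (by norm_num)]
      simp
  
lemma pvDsN_le : ∀ (e m : Nat), m < 10 ^ e → pvDsN m ≤ 9 * e := by
  intro e
  induction e with
  | zero => intro m hm; interval_cases m; rw [pvDsN]; simp
  | succ e ih =>
    intro m hm
    by_cases h10 : m < 10
    · rw [pvDsN_lt h10]; omega
    · rw [pvDsN_ge h10]
      have := ih (m / 10) (by rw [pow_succ] at hm; omega)
      omega

lemma pvDsN_pos : ∀ (m : Nat), 1 ≤ m → 1 ≤ pvDsN m := by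
  intro m
  induction m using Nat.strong_induction_on with
  | _ m ih =>
    intro hm
    by_cases h10 : m < 10
    · rw [pvDsN_lt h10]; omega
    · rw [pvDsN_ge h10]
      have := ih (m / 10) (by omega) (by omega)
      omega

-- the whole tail of both programs, as a function of the digit sum s ∈ [1, 90]: enumerated
lemma small_case_k : ∀ (k : Nat), k < 90 →
    (pvHelperA (PySem.Int.toChars ((k : Int) + 1)) ((PySem.Int.toChars ((k : Int) + 1)).length + 1) 0
        (((PySem.Int.toChars ((k : Int) + 1)).length : Int) - 1)) =
      (pvRev ((k : Int) + 1).toNat ((k : Int) + 1) 0 == ((k : Int) + 1)) := by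
  decide

lemma small_case (s : Int) (h1 : 1 ≤ s) (h2 : s ≤ 90) :
    (pvHelperA (PySem.Int.toChars s) ((PySem.Int.toChars s).length + 1) 0
        (((PySem.Int.toChars s).length : Int) - 1)) =
      (pvRev s.toNat s 0 == s) := by
  have hs : s = ((s - 1).toNat : Int) + 1 := by omega
  rw [hs]
  exact small_case_k (s - 1).toNat (by omega)

-- ===== VERDICT (by name: the statement is the Claim_ definition above) =====
theorem sum_of_digits_is_palindrome_spec : Claim_equal_sum_of_digits_is_palindrome := by
  intro num hdom
  unfold Spec_sum_of_digits_is_palindrome sum_of_digits_is_palindrome sum_of_digits_is_palindrome_alt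
  by_cases h10 : num < 10
  · rw [if_pos h10, if_pos h10]
  · rw [if_neg h10, if_neg h10]
    have hdom' : num ≤ 2147483648 := by
      unfold Dom_sum_of_digits_is_palindrome pvDomInt at hdom
      exact (of_decide_eq_true hdom).2
    have hnum : num = (num.toNat : Int) := by omega
    set m := num.toNat with hm
    have hm10 : 10 ≤ m := by omega
    have hmlt : m < 10 ^ 10 := by omega
    -- A's digit sum equals pvDsN m
    have hA : (PySem.Int.toChars num).foldl (fun a c => a + (PySem.Int.ofChars? [c]).getD 0) 0
        = (pvDsN m : Int) := by
      rw [toChars_eq_pvDigs num (by omega), foldA_eq_pvDsN]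
      simp
      rw [← hm]
    -- B's digit sum equals pvDsN m
    have hB : pvDSum m num 0 = (pvDsN m : Int) := by
      conv_lhs => rw [hnum]
      rw [pvDSum_eq m m 0 (le_refl m)]
      simp
    simp only [hA, hB]
    exact small_case (pvDsN m : Int)
      (by exact_mod_cast pvDsN_pos m (by omega))
      (by exact_mod_cast pvDsN_le 10 m hmlt)
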